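-- pv_equiv track=rewrite | github.com/lingxiao/learn-adj-relation | scripts/pattern_to_re.py | go_parse_re
-- ===== SOURCE A (Python) =====
-- import string
--
-- def go_parse_re(rss,words):
-- 	if not rss: return ""
-- 	else:
-- 		head = rss[0 ]
-- 		tail = rss[1:]
--
-- 		# translate token to regular expression
-- 		if words: token = parse_each(head,words[0])
-- 		else    : token = parse_each(head,r'.+'   )
--
-- 		# add space if needed
-- 		if tail and not optional(tail[0]): token += "\s+"
--
-- 		# recurse
-- 		if hole(head): return token + go_parse_re(tail,words[1:])
-- 		else         : return token + go_parse_re(tail,words    )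
--
-- def parse_each(rs,ai):
-- 	if wild(rs):
-- 		return r'.+\b'
-- 	elif hole(rs):
-- 		return ai + r'\b'
-- 	elif optional(rs):
-- 		return option(rs[1:len(rs)-1])
-- 	else:
-- 		return rs + r'\b'
--
-- def option(rs):
-- 	out = "("
-- 	rss = rs.split("|")
-- 	for rs in rss:
-- 		if rs in string.punctuation:
-- 			out += "\s*" + rs + "|"
-- 		else:
-- 			out += "\s+" + rs + "|"
-- 	return out[:len(out)-1] + ")?"
--
-- def wild(rs):
-- 	return rs == '<*>'
--
-- def hole(rs): return rs == "*"
--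
-- def optional(rs):
-- 	return rs[0] == "(" and rs[-1] == ")"
-- ===== SOURCE B (Python) =====
-- import string
--
-- def go_parse_re(rss, words):
--     frags = []
--     w = 0
--     for rs, nxt in zip(rss, rss[1:] + [None]):
--         ai = words[w] if w < len(words) else r'.+'
--         sep = r"\s+" if (nxt is not None and not optional(nxt)) else ""
--         frags.append(parse_each(rs, ai) + sep)
--         if hole(rs):
--             w += 1
--     return "".join(frags)
--
-- def parse_each(rs,ai):
--     if wild(rs):
--         return r'.+\b'
--     elif hole(rs):
--         return ai + r'\b'
--     elif optional(rs):
--         return option(rs[1:len(rs)-1])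
--     else:
--         return rs + r'\b'
--
-- def option(rs):
--     out = "("
--     rss = rs.split("|")
--     for rs in rss:
--         if rs in string.punctuation:
--             out += "\s*" + rs + "|"
--         else:
--             out += "\s+" + rs + "|"
--     return out[:len(out)-1] + ")?"
--
-- def wild(rs):
--     return rs == '<*>'
--
-- def hole(rs): return rs == "*"
--
-- def optional(rs):
--     return rs[0] == "(" and rs[-1] == ")"
-- ===== Notes on version B (the rewrite author's own statement) =====
-- stated objective: alternative
-- what changed: Replaces A's recursion (rebuilding words suffixes and peeking at tail) with a single iterative pass zipping each token with its successor, keeping an explicit word pointer advanced on holes, collecting fragments in a list joined at the end.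
import Mathlib
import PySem

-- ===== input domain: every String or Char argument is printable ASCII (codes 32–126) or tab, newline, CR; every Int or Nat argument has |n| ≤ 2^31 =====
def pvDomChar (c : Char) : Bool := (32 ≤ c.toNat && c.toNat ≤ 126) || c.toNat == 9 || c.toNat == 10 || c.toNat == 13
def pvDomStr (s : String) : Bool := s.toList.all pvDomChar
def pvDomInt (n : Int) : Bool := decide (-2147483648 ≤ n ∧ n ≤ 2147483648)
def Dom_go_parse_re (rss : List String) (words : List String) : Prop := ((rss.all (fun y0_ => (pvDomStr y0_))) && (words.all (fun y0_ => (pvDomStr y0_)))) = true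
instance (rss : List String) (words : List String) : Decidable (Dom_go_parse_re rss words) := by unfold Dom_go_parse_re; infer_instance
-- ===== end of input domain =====

-- B rewrites the recursion as ONE iterative pass (zip with the successor token, fragment list + join,
-- explicit word pointer advanced on holes); same return value, objective: alternative decomposition.
-- Shared helpers (identical Python code in Source A and Source B: wild/hole/optional/option/parse_each).

def pvWild (rs : String) : Bool := rs == "<*>"

def pvHole (rs : String) : Bool := rs == "*"

-- rs[0] / rs[-1]: Python raises IndexError on rs = "" (excluded by Pre_); pyGet? = none there.
def pvOptional (rs : String) : Bool :=
  (PySem.Str.pyGet? rs 0 == some '(') && (PySem.Str.pyGet? rs (-1) == some ')')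

def pvPunct : String := "!\"#$%&'()*+,-./:;<=>?@[\\]^_`{|}~"   -- string.punctuation

def pvOption (rs : String) : String :=
  let rss := (PySem.Str.split? rs "|").getD []   -- sep "|" ≠ "": never none
  let out := rss.foldl (fun out r =>
    if PySem.Str.isIn r pvPunct then out ++ "\\s*" ++ r ++ "|"
    else out ++ "\\s+" ++ r ++ "|") "("
  PySem.Str.slice out none (some (PySem.Str.len out - 1)) ++ ")?"

def pvParseEach (rs ai : String) : String :=
  if pvWild rs then ".+\\b"
  else if pvHole rs then ai ++ "\\b"
  else if pvOptional rs then
    pvOption (PySem.Str.slice rs (some 1) (some (PySem.Str.len rs - 1)))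
  else rs ++ "\\b"

-- ===== PORT A =====
def go_parse_re : List String → List String → String
  | [], _ => ""
  | head :: tail, words =>
    let token := match words with
      | w :: _ => pvParseEach head w
      | [] => pvParseEach head ".+"
    let token := match tail with
      | t :: _ => if pvOptional t = false then token ++ "\\s+" else token
      | [] => token
    if pvHole head then token ++ go_parse_re tail (PySem.List.slice words (some 1) none)
    else token ++ go_parse_re tail words

-- ===== PORT B =====
def pvStepB (words : List String) (acc : List String × Nat) (p : String × Option String) :
    List String × Nat :=
  let ai := if acc.2 < words.length then (PySem.List.pyGet? words (acc.2 : Int)).getD ".+" else ".+"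
  let sep := match p.2 with
    | some t => if pvOptional t = false then "\\s+" else ""
    | none => ""
  let frags := acc.1 ++ [pvParseEach p.1 ai ++ sep]
  if pvHole p.1 then (frags, acc.2 + 1) else (frags, acc.2)

def go_parse_re_alt (rss : List String) (words : List String) : String :=
  let nexts := (PySem.List.slice rss (some 1) none).map some ++ [none]
  PySem.Str.join "" ((rss.zip nexts).foldl (pvStepB words) ([], 0)).1

-- ===== PRECONDITION & SPEC =====
-- Pre_ excludes rss containing an empty token: there Python's optional("") raises IndexError
-- (both A and B raise; the ports return a value, so those inputs are outside the claim).
def Pre_go_parse_re (rss : List String) (words : List String) : Prop := ¬ ("" ∈ rss)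
instance (rss : List String) (words : List String) : Decidable (Pre_go_parse_re rss words) := by
  unfold Pre_go_parse_re; infer_instance

def pvWitness_go_parse_re : List String × List String := (["hello", "*", "(in|of)"], ["big"])

def Spec_go_parse_re (rss : List String) (words : List String) (out : String) : Prop := out = go_parse_re_alt rss words
instance (rss : List String) (words : List String) (out : String) : Decidable (Spec_go_parse_re rss words out) := by unfold Spec_go_parse_re; infer_instance

-- ===== CLAIM (what is proved, stated in full; the proofs are below) =====
def Claim_equal_go_parse_re : Prop := ∀ (rss : List String) (words : List String), Dom_go_parse_re rss words → Pre_go_parse_re rss words → Spec_go_parse_re rss words (go_parse_re rss words)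

-- ===== LEMMAS AND PROOFS =====

theorem pvCharsJoin_append : ∀ (fs : List (List Char)) (t : List Char),
    PySem.Chars.join [] (fs ++ [t]) = PySem.Chars.join [] fs ++ t
  | [], t => by simp [PySem.Chars.join_singleton, PySem.Chars.join_nil]
  | [f], t => by
    simp [PySem.Chars.join_cons_cons, PySem.Chars.join_singleton]
  | f :: g :: rest, t => by
    have ih := pvCharsJoin_append (g :: rest) t
    simp only [List.cons_append] at ih ⊢
    simp [PySem.Chars.join_cons_cons, ih]

theorem pvJoin_append (fs : List String) (t : String) :
    PySem.Str.join "" (fs ++ [t]) = PySem.Str.join "" fs ++ t := by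
  simp only [PySem.Str.join, List.map_append, List.map_cons, List.map_nil]
  rw [show ("" : String).toList = [] from rfl, pvCharsJoin_append]
  simp [String.ofList_append]

theorem pvAi (words : List String) (w : Nat) :
    (if w < words.length then (PySem.List.pyGet? words (w : Int)).getD ".+" else ".+")
    = ((words.drop w).headD ".+") := by
  by_cases h : w < words.length
  · simp [h, List.headD_eq_head?_getD, List.head?_drop]
  · simp [h, List.drop_eq_nil_of_le (le_of_not_gt h)]

theorem pvA_single (r : String) (ws : List String) :
    go_parse_re [r] ws = pvParseEach r (ws.headD ".+") := by
  cases ws <;> by_cases h : pvHole r = true <;> simp [go_parse_re, h]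

theorem pvA_cons_cons (r r2 : String) (rest ws : List String) :
    go_parse_re (r :: r2 :: rest) ws =
      (pvParseEach r (ws.headD ".+") ++ (if pvOptional r2 = false then "\\s+" else ""))
      ++ (if pvHole r = true then go_parse_re (r2 :: rest) (PySem.List.slice ws (some 1) none)
          else go_parse_re (r2 :: rest) ws) := by
  cases ws <;> by_cases h : pvHole r = true <;> by_cases hc : pvOptional r2 = false <;>
    simp [go_parse_re, h, hc, String.append_assoc]

theorem pvLoop (words : List String) : ∀ (rss : List String) (w : Nat) (frags : List String),
    PySem.Str.join ""
      ((rss.zip ((PySem.List.slice rss (some 1) none).map some ++ [none])).foldl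
        (pvStepB words) (frags, w)).1
    = PySem.Str.join "" frags ++ go_parse_re rss (words.drop w)
  | [], w, frags => by simp [go_parse_re]
  | [r], w, frags => by
    simp only [PySem.List.slice_from_one, List.tail_cons, List.map_nil, List.nil_append,
      List.zip_cons_cons, List.zip_nil_left, List.foldl_cons, List.foldl_nil,
      pvStepB, pvAi, pvA_single]
    by_cases h : pvHole r = true
    · rw [if_pos h, pvJoin_append]; simp
    · rw [if_neg h, pvJoin_append]; simp
  | r :: r2 :: rest2, w, frags => by
    have hslice : PySem.List.slice (r :: r2 :: rest2) (some 1) none = r2 :: rest2 := by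
      rw [PySem.List.slice_from_one]; rfl
    have hslice2 : PySem.List.slice (r2 :: rest2) (some 1) none = rest2 := by
      rw [PySem.List.slice_from_one]; rfl
    have hdrop : PySem.List.slice (words.drop w) (some 1) none = words.drop (w + 1) := by
      rw [PySem.List.slice_from_one, List.tail_drop]
    rw [pvA_cons_cons]
    simp only [hslice, List.map_cons, List.cons_append, List.zip_cons_cons, List.foldl_cons,
      pvStepB, pvAi]
    by_cases h : pvHole r = true
    · rw [if_pos h, if_pos h]
      have ih := pvLoop words (r2 :: rest2) (w + 1)
        (frags ++ [pvParseEach r ((List.drop w words).headD ".+") ++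
          (if pvOptional r2 = false then "\\s+" else "")])
      rw [hslice2] at ih
      rw [ih, pvJoin_append, hdrop, String.append_assoc]
    · rw [if_neg h, if_neg h]
      have ih := pvLoop words (r2 :: rest2) w
        (frags ++ [pvParseEach r ((List.drop w words).headD ".+") ++
          (if pvOptional r2 = false then "\\s+" else "")])
      rw [hslice2] at ih
      rw [ih, pvJoin_append, String.append_assoc]

-- ===== VERDICT (by name: the statement is the Claim_ definition above) =====
theorem go_parse_re_spec : Claim_equal_go_parse_re := by
  intro rss words _ _
  unfold Spec_go_parse_re go_parse_re_alt
  have h := pvLoop words rss 0 []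
  simpa using h.symm
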